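-- pv_equiv track=rewrite | github.com/zonk1/mutt-stuff | digest-phabricator-thread/digest-phabricator-thread.py | filter_stuff
-- ===== SOURCE A (Python) =====
-- def filter_stuff(body):
--     # filter away 'EMAIL PREFERENCES', 'TASK DETAILS' and 'To:', 'From:' stuff
--     # out of phab email
--     out = []
--     skip_lines = 0
--     for line in body.split('\n'):
--         if skip_lines > 0:
--             skip_lines -= 1
--             continue
--         if line.startswith('EMAIL PREFERENCES'):
--             skip_lines = 2
--             continue
--         elif line.startswith('TASK DETAIL'):
--             skip_lines = 2
--             continue
--         elif line.startswith('To: '):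
--             continue
--         elif line.startswith('Cc: '):
--             continue
--         out.append(line)
--     return '\n'.join(out)
-- ===== SOURCE B (Python) =====
-- def _is_header(line):
--     return line.startswith('EMAIL PREFERENCES') or line.startswith('TASK DETAIL')
--
--
-- def _is_addr(line):
--     return line.startswith('To: ') or line.startswith('Cc: ')
--
--
-- def filter_stuff(body):
--     # Staged passes: first locate the header blocks (each suppresses itself and
--     # the next two lines; headers inside an already-suppressed window do not
--     # start a new block), then build the set of suppressed indices, then keep
--     # every line outside it that is not a To:/Cc: line.
--     lines = body.split('\n')
--     starts = []
--     limit = 0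
--     for i, line in enumerate(lines):
--         if i >= limit and _is_header(line):
--             starts.append(i)
--             limit = i + 3
--     dropped = {j for s in starts for j in (s, s + 1, s + 2)}
--     kept = [line for i, line in enumerate(lines)
--             if i not in dropped and not _is_addr(line)]
--     return '\n'.join(kept)
-- ===== Notes on version B (the rewrite author's own statement) =====
-- stated objective: alternative
-- what changed: Replaces A's single pass with a carried skip counter by three staged passes: one pass computes the start indices of the header blocks, from them a set of suppressed line indices is built, and a final comprehension keeps the lines outside that set that are not To:/Cc: lines.
import Mathlib
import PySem

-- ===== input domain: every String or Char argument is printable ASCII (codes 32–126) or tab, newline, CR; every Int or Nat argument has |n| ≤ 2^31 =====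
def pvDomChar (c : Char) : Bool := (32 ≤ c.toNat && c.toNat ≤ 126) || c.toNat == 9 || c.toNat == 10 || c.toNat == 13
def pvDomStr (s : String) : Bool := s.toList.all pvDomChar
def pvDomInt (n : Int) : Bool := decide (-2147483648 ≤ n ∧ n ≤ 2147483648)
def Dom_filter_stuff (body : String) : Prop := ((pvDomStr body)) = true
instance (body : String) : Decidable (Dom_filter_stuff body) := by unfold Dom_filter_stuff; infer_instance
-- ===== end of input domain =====

-- B restructures A's single pass with a carried skip counter into three staged
-- passes: find the header-block start indices, build the set of suppressed
-- indices, then filter by index membership (objective: alternative).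

-- ===== PORT A =====
-- the body of A's for-loop: state (out, skip_lines)
def pvStepA (st : List String × Int) (line : String) : List String × Int :=
  if st.2 > 0 then (st.1, st.2 - 1)
  else if PySem.Str.startswith line "EMAIL PREFERENCES" then (st.1, 2)
  else if PySem.Str.startswith line "TASK DETAIL" then (st.1, 2)
  else if PySem.Str.startswith line "To: " then (st.1, st.2)
  else if PySem.Str.startswith line "Cc: " then (st.1, st.2)
  else (st.1 ++ [line], st.2)

-- body.split('\n'): the separator is nonempty, so split? is always `some`
def filter_stuff (body : String) : String :=
  let st := ((PySem.Str.split? body "\n").getD []).foldl pvStepA ([], 0)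
  PySem.Str.join "\n" st.1

-- ===== PORT B =====
def pvIsHeader (line : String) : Bool :=
  PySem.Str.startswith line "EMAIL PREFERENCES" || PySem.Str.startswith line "TASK DETAIL"

def pvIsAddr (line : String) : Bool :=
  PySem.Str.startswith line "To: " || PySem.Str.startswith line "Cc: "

-- pass 1's loop body: state (starts, limit)
def pvPass1Step (st : List Int × Int) (p : Int × String) : List Int × Int :=
  if p.1 ≥ st.2 ∧ pvIsHeader p.2 then (st.1 ++ [p.1], p.1 + 3) else st

def filter_stuff_alt (body : String) : String :=
  let lines := (PySem.Str.split? body "\n").getD []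
  let starts := ((PySem.List.enumerate lines).foldl pvPass1Step ([], 0)).1
  let dropped : PySem.Set Int :=
    PySem.Set.ofList (starts.flatMap (fun s => [s, s + 1, s + 2]))
  let kept := (PySem.List.enumerate lines).filterMap
    (fun p => if !(PySem.Set.contains dropped p.1) && !(pvIsAddr p.2) then some p.2 else none)
  PySem.Str.join "\n" kept

-- ===== PRECONDITION & SPEC =====
def Spec_filter_stuff (body : String) (out : String) : Prop := out = filter_stuff_alt body
instance (body : String) (out : String) : Decidable (Spec_filter_stuff body out) := by unfold Spec_filter_stuff; infer_instance

-- ===== CLAIM =====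
def Claim_equal_filter_stuff : Prop := ∀ (body : String), Dom_filter_stuff body → Spec_filter_stuff body (filter_stuff body)

-- ===== LEMMAS AND PROOFS =====

-- the common specification both programs are reduced to: the simple recursion
def pvWalk : List String → List String
  | [] => []
  | l :: rest =>
    if pvIsHeader l then pvWalk (rest.drop 2)
    else if pvIsAddr l then pvWalk rest
    else l :: pvWalk rest
termination_by xs => xs.length
decreasing_by
  · simp [Nat.lt_succ_of_le (Nat.sub_le _ _)]
  · simp
  · simp

-- ---- A-side: the fold with the skip counter computes pvWalk ----

-- a positive skip counter just drops that many lines from the fold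
theorem pvFoldA_skip (rest : List String) (k : Nat) (out : List String) :
    (rest.foldl pvStepA (out, (k : Int))).1 = ((rest.drop k).foldl pvStepA (out, 0)).1 := by
  induction rest generalizing k out with
  | nil => simp
  | cons a rest ih =>
    cases k with
    | zero => simp
    | succ k' =>
      have h : pvStepA (out, ((k' + 1 : Nat) : Int)) a = (out, (k' : Int)) := by
        simp only [pvStepA]
        rw [if_pos (by omega)]
        congr 1
        push_cast
        ring
      simp only [List.foldl_cons, h, List.drop_succ_cons]
      exact ih k' out

theorem pvFoldA_eq_walk (lines : List String) (out : List String) :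
    (lines.foldl pvStepA (out, 0)).1 = out ++ pvWalk lines := by
  induction lines using pvWalk.induct generalizing out with
  | case1 => simp [pvWalk]
  | case2 l rest h ih =>
    have hs : pvStepA (out, 0) l = (out, 2) := by
      simp only [pvStepA, pvIsHeader] at *
      split_ifs with c1 c2 c3 <;> first | rfl | omega | simp_all
    rw [List.foldl_cons, hs, show (2 : Int) = ((2 : Nat) : Int) by norm_num,
      pvFoldA_skip rest 2 out, ih out]
    simp only [pvWalk]
    rw [if_pos h]
  | case3 l rest h h2 ih =>
    have hs : pvStepA (out, 0) l = (out, 0) := by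
      simp only [pvStepA, pvIsHeader, pvIsAddr] at *
      split_ifs with c1 c2 c3 c4 c5 <;> first | rfl | omega | simp_all
    rw [List.foldl_cons, hs, ih out]
    simp only [pvWalk]
    rw [if_neg h, if_pos h2]
  | case4 l rest h h2 ih =>
    have hs : pvStepA (out, 0) l = (out ++ [l], 0) := by
      simp only [pvStepA, pvIsHeader, pvIsAddr] at *
      split_ifs with c1 c2 c3 c4 c5 <;> first | rfl | omega | simp_all
    rw [List.foldl_cons, hs, ih (out ++ [l])]
    simp only [pvWalk]
    rw [if_neg h, if_neg h2]
    simp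

-- ---- B-side ----

-- recursive form of pass 1
def pvS (i limit : Int) : List String → List Int
  | [] => []
  | l :: rest =>
    if limit ≤ i ∧ pvIsHeader l then i :: pvS (i + 1) (i + 3) rest
    else pvS (i + 1) limit rest

theorem pvFold1_eq_S (lines : List String) (i : Int) (acc : List Int) (limit : Int) :
    ((PySem.List.enumerate lines i).foldl pvPass1Step (acc, limit)).1
      = acc ++ pvS i limit lines := by
  induction lines generalizing i acc limit with
  | nil => simp [pvS]
  | cons l rest ih =>
    rw [PySem.List.enumerate_cons, List.foldl_cons]
    simp only [pvPass1Step, pvS]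
    by_cases h : limit ≤ i ∧ pvIsHeader l = true
    · rw [if_pos (by exact ⟨h.1, h.2⟩), if_pos h, ih]
      simp
    · rw [if_neg (by exact fun ⟨a, b⟩ => h ⟨a, b⟩), if_neg h, ih]

theorem pvS_ge (lines : List String) (i limit s : Int) (h : s ∈ pvS i limit lines) :
    limit ≤ s ∧ i ≤ s := by
  induction lines generalizing i limit with
  | nil => simp [pvS] at h
  | cons l rest ih =>
    simp only [pvS] at h
    split_ifs at h with c
    · rcases List.mem_cons.mp h with rfl | h
      · exact ⟨c.1, le_refl _⟩
      · have := ih (i + 1) (i + 3) h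
        omega
    · have := ih (i + 1) limit h
      omega

theorem pvS_irrel (lines : List String) (i limit limit' : Int)
    (h1 : limit ≤ i) (h2 : limit' ≤ i) : pvS i limit lines = pvS i limit' lines := by
  induction lines generalizing i limit limit' with
  | nil => rfl
  | cons l rest ih =>
    simp only [pvS]
    by_cases c : pvIsHeader l = true
    · rw [if_pos ⟨h1, c⟩, if_pos ⟨h2, c⟩]
    · rw [if_neg (fun h => c h.2), if_neg (fun h => c h.2)]
      exact ih (i + 1) limit limit' (by omega) (by omega)

theorem pvS_skip (rest : List String) (i : Int) :
    pvS (i + 1) (i + 3) rest = pvS (i + 3) (i + 3) (rest.drop 2) := by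
  cases rest with
  | nil => rfl
  | cons a rest' =>
    rw [pvS, if_neg (by rintro ⟨h1, -⟩; omega)]
    cases rest' with
    | nil => rfl
    | cons b rest'' =>
      rw [pvS, if_neg (by rintro ⟨h1, -⟩; omega)]
      simp only [List.drop_succ_cons, List.drop_zero]
      rw [show i + 1 + 1 + 1 = i + 3 by ring]

-- boolean membership in the suppressed-index set, characterised
def pvD (starts : List Int) (j : Int) : Bool :=
  PySem.Set.contains (PySem.Set.ofList (starts.flatMap (fun s => [s, s + 1, s + 2]))) j

theorem pvD_iff (starts : List Int) (j : Int) :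
    pvD starts j = true ↔ ∃ s ∈ starts, s ≤ j ∧ j < s + 3 := by
  unfold pvD
  rw [PySem.Set.contains_iff, PySem.Set.mem_ofList, List.mem_flatMap]
  constructor
  · rintro ⟨s, hs, hj⟩
    refine ⟨s, hs, ?_⟩
    simp at hj
    omega
  · rintro ⟨s, hs, h1, h2⟩
    refine ⟨s, hs, ?_⟩
    simp
    omega

-- the filtering pass, abstracted over the membership test
def pvKept (D : Int → Bool) (ps : List (Int × String)) : List String :=
  ps.filterMap (fun p => if !(D p.1) && !(pvIsAddr p.2) then some p.2 else none)

theorem pvKept_congr (D D' : Int → Bool) (ps : List (Int × String))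
    (h : ∀ p ∈ ps, D p.1 = D' p.1) : pvKept D ps = pvKept D' ps := by
  induction ps with
  | nil => rfl
  | cons p ps ih =>
    simp only [pvKept, List.filterMap_cons] at *
    rw [h p List.mem_cons_self, ih (fun q hq => h q (List.mem_cons_of_mem _ hq))]

theorem pvD_head (s : Int) (S : List Int) (j : Int) (h1 : s ≤ j) (h2 : j < s + 3) :
    pvD (s :: S) j = true := by
  rw [pvD_iff]
  exact ⟨s, List.mem_cons_self, h1, h2⟩

theorem pvD_cons_high (s : Int) (S : List Int) (j : Int) (h : s + 3 ≤ j) :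
    pvD (s :: S) j = pvD S j := by
  rw [Bool.eq_iff_iff, pvD_iff, pvD_iff]
  constructor
  · rintro ⟨t, ht, h1, h2⟩
    rcases List.mem_cons.mp ht with rfl | ht
    · omega
    · exact ⟨t, ht, h1, h2⟩
  · rintro ⟨t, ht, h1, h2⟩
    exact ⟨t, List.mem_cons_of_mem _ ht, h1, h2⟩

theorem pvKept_drop (D : Int → Bool) (j : Int) (x : String) (ps : List (Int × String))
    (h : D j = true) : pvKept D ((j, x) :: ps) = pvKept D ps := by
  simp [pvKept, h]

theorem pvKept_eq_walk (lines : List String) (i : Int) :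
    pvKept (pvD (pvS i i lines)) (PySem.List.enumerate lines i) = pvWalk lines := by
  induction lines using pvWalk.induct generalizing i with
  | case1 => simp [pvKept, pvWalk, PySem.List.enumerate_nil]
  | case2 l rest h ih =>
    have hS : pvS i i (l :: rest) = i :: pvS (i + 3) (i + 3) (rest.drop 2) := by
      rw [pvS, if_pos ⟨le_refl i, h⟩, pvS_skip]
    rw [hS, PySem.List.enumerate_cons,
      pvKept_drop _ _ _ _ (pvD_head _ _ _ (le_refl i) (by omega))]
    have hwalk : pvWalk (l :: rest) = pvWalk (rest.drop 2) := by
      rw [pvWalk, if_pos h]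
    rw [hwalk]
    cases rest with
    | nil => simp [pvKept, pvWalk, PySem.List.enumerate_nil]
    | cons a rest2 =>
      rw [PySem.List.enumerate_cons,
        pvKept_drop _ _ _ _ (pvD_head _ _ _ (by omega) (by omega))]
      cases rest2 with
      | nil => simp [pvKept, pvWalk, PySem.List.enumerate_nil]
      | cons b rest3 =>
        rw [PySem.List.enumerate_cons,
          pvKept_drop _ _ _ _ (pvD_head _ _ _ (by omega) (by omega))]
        simp only [List.drop_succ_cons, List.drop_zero]
        rw [show i + 1 + 1 + 1 = i + 3 by ring,
          pvKept_congr _ (pvD (pvS (i + 3) (i + 3) rest3)) _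
            (fun p hp => pvD_cons_high i _ p.1 (by
              rcases (PySem.List.mem_enumerate_iff _ _ _).mp hp with ⟨k, hk, rfl⟩
              simp only
              omega))]
        have := ih (i + 3)
        simpa using this
  | case3 l rest h h2 ih =>
    have hS : pvS i i (l :: rest) = pvS (i + 1) (i + 1) rest := by
      rw [pvS, if_neg (by rintro ⟨-, hh⟩; exact absurd hh h),
        pvS_irrel rest (i + 1) i (i + 1) (by omega) (le_refl _)]
    rw [hS, PySem.List.enumerate_cons]
    have hdrop : pvKept (pvD (pvS (i + 1) (i + 1) rest)) ((i, l) :: PySem.List.enumerate rest (i + 1))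
        = pvKept (pvD (pvS (i + 1) (i + 1) rest)) (PySem.List.enumerate rest (i + 1)) := by
      simp [pvKept, h2]
    rw [hdrop, ih (i + 1), pvWalk, if_neg h, if_pos h2]
  | case4 l rest h h2 ih =>
    have hS : pvS i i (l :: rest) = pvS (i + 1) (i + 1) rest := by
      rw [pvS, if_neg (by rintro ⟨-, hh⟩; exact absurd hh h),
        pvS_irrel rest (i + 1) i (i + 1) (by omega) (le_refl _)]
    have hfalse : pvD (pvS (i + 1) (i + 1) rest) i = false := by
      rw [Bool.eq_false_iff]
      rw [ne_eq, pvD_iff]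
      rintro ⟨s, hs, h1, -⟩
      have := pvS_ge rest (i + 1) (i + 1) s hs
      omega
    rw [hS, PySem.List.enumerate_cons]
    have hkeep : pvKept (pvD (pvS (i + 1) (i + 1) rest)) ((i, l) :: PySem.List.enumerate rest (i + 1))
        = l :: pvKept (pvD (pvS (i + 1) (i + 1) rest)) (PySem.List.enumerate rest (i + 1)) := by
      simp [pvKept, hfalse, h2]
    rw [hkeep, ih (i + 1), pvWalk, if_neg h, if_neg h2]

-- ===== VERDICT =====
theorem filter_stuff_spec : Claim_equal_filter_stuff := by
  intro body _
  show filter_stuff body = filter_stuff_alt body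
  unfold filter_stuff filter_stuff_alt
  have h := pvKept_eq_walk ((PySem.Str.split? body "\n").getD []) 0
  simp only [pvKept, pvD] at h
  show PySem.Str.join "\n" (((PySem.Str.split? body "\n").getD []).foldl pvStepA ([], 0)).1 = _
  rw [pvFoldA_eq_walk, List.nil_append]
  dsimp only
  rw [pvFold1_eq_S, List.nil_append]
  exact (congrArg (PySem.Str.join "\n") h).symm
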